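-- pv_equiv track=rewrite | github.com/Matt-Aurora-Ventures/Jarvis | core/notion_ingest.py | _looks_like_action
-- ===== SOURCE A (Python) =====
-- def _looks_like_action(text: str) -> bool:
--     keywords = [
--         "build",
--         "test",
--         "backtest",
--         "paper",
--         "deploy",
--         "implement",
--         "automate",
--         "create",
--         "optimize",
--         "ship",
--         "launch",
--         "setup",
--         "set up",
--         "run",
--     ]
--     lower = text.lower()
--     return any(word in lower for word in keywords)
-- ===== SOURCE B (Python) =====
-- def _looks_like_action(text: str) -> bool:
--     keywords = (
--         "build", "test", "backtest", "paper", "deploy", "implement",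
--         "automate", "create", "optimize", "ship", "launch", "setup",
--         "set up", "run",
--     )
--     lower = text.lower()
--     # single left-to-right sweep over the text: at each position, does a keyword start here?
--     return any(lower.startswith(w, i) for i in range(len(lower)) for w in keywords)
-- ===== Notes on version B (the rewrite author's own statement) =====
-- stated objective: alternative
-- what changed: Replaced the per-keyword substring scans ('word in lower' for each of 14 keywords) with one left-to-right sweep over the text that at each position checks whether any keyword starts there (startswith with an offset), traversing the text once by position instead of once per keyword.
import Mathlib
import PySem

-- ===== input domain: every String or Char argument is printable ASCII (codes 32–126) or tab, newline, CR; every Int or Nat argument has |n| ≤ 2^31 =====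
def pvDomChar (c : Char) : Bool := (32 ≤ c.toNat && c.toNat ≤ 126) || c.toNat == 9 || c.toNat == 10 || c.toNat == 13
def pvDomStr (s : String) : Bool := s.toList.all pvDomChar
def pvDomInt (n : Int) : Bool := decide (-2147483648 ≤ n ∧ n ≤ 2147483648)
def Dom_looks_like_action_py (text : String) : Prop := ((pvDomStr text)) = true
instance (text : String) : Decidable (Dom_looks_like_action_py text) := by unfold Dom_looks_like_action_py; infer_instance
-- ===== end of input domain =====

-- ===== PORT A =====
-- B changes only the traversal: A scans the whole text once per keyword via 'word in lower';
-- B makes one positional sweep and checks which keyword starts at each index (alternative, not faster).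
def pvKeywords : List String :=
  ["build", "test", "backtest", "paper", "deploy", "implement", "automate",
   "create", "optimize", "ship", "launch", "setup", "set up", "run"]

def looks_like_action_py (text : String) : Bool :=
  let lower := PySem.Str.lower text
  pvKeywords.any (fun word => PySem.Str.isIn word lower)

-- ===== PORT B =====
def looks_like_action_py_alt (text : String) : Bool :=
  let lower := (PySem.Str.lower text).toList
  (List.range lower.length).any (fun i =>
    pvKeywords.any (fun w => PySem.Chars.startswith (lower.drop i) w.toList))
-- ===== PRECONDITION & SPEC =====
def Spec_looks_like_action_py (text : String) (out : Bool) : Prop := out = looks_like_action_py_alt text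
instance (text : String) (out : Bool) : Decidable (Spec_looks_like_action_py text out) := by unfold Spec_looks_like_action_py; infer_instance

-- ===== CLAIM (what is proved, stated in full; the proofs are below) =====
def Claim_equal_looks_like_action_py : Prop := ∀ (text : String), Dom_looks_like_action_py text → Spec_looks_like_action_py text (looks_like_action_py text)

-- ===== LEMMAS AND PROOFS =====

-- ===== VERDICT (by name: the statement is the Claim_ definition above) =====
-- at each keyword: occurring as a substring = starting at some in-range position
lemma pv_isIn_eq_sweep (w lo : List Char) (hw : w ≠ []) :
    PySem.Chars.isIn w lo =
      (List.range lo.length).any (fun i => PySem.Chars.startswith (lo.drop i) w) := by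
  rw [Bool.eq_iff_iff]
  simp only [List.any_eq_true, List.mem_range, PySem.Chars.startswith_iff]
  rw [← PySem.Chars.exists_prefix_drop_iff_isIn]
  constructor
  · rintro ⟨j, hj⟩
    by_cases h : j < lo.length
    · exact ⟨j, h, hj⟩
    · exfalso
      rw [List.drop_eq_nil_of_le (le_of_not_gt h)] at hj
      exact hw (List.prefix_nil.mp hj)
  · rintro ⟨i, _, hi⟩
    exact ⟨i, hi⟩

lemma pv_any_swap (lo : List Char) (kws : List String) (h : ∀ w ∈ kws, w.toList ≠ []) :
    kws.any (fun w => PySem.Chars.isIn w.toList lo) =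
      (List.range lo.length).any (fun i =>
        kws.any (fun w => PySem.Chars.startswith (lo.drop i) w.toList)) := by
  rw [Bool.eq_iff_iff]
  simp only [List.any_eq_true, List.mem_range]
  constructor
  · rintro ⟨w, hw, hin⟩
    rw [pv_isIn_eq_sweep _ _ (h w hw)] at hin
    simp only [List.any_eq_true, List.mem_range] at hin
    obtain ⟨i, hi, hs⟩ := hin
    exact ⟨i, hi, w, hw, hs⟩
  · rintro ⟨i, hi, w, hw, hs⟩
    refine ⟨w, hw, ?_⟩
    rw [pv_isIn_eq_sweep _ _ (h w hw)]
    simp only [List.any_eq_true, List.mem_range]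
    exact ⟨i, hi, hs⟩

theorem looks_like_action_py_spec : Claim_equal_looks_like_action_py := by
  intro text _
  unfold Spec_looks_like_action_py looks_like_action_py looks_like_action_py_alt
  simp only [PySem.Str.isIn]
  exact pv_any_swap _ pvKeywords (by decide)
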